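-- pv_equiv track=rewrite | github.com/Veronica-Kook/Codility-Python | 1.BinaryGap.py | many_zeros
-- ===== SOURCE A (Python) =====
-- def many_zeros(lst):
--
--     count = 0
--     count_lst = []
--
--     for i in range(len(lst)):
--
--         if lst[i] == 0:
--             count += 1
--
--         else:
--             count_lst.append(count)
--             count = 0
--
--     return count_lst
-- ===== SOURCE B (Python) =====
-- def many_zeros(lst):
--     positions = [i for i, x in enumerate(lst) if x != 0]
--     gaps = []
--     prev = -1
--     for p in positions:
--         gaps.append(p - prev - 1)
--         prev = p
--     return gaps
-- ===== Notes on version B (the rewrite author's own statement) =====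
-- stated objective: alternative
-- what changed: Replaces the running zero-counter with an index table of nonzero positions followed by a consecutive-difference pass.
import Mathlib
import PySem

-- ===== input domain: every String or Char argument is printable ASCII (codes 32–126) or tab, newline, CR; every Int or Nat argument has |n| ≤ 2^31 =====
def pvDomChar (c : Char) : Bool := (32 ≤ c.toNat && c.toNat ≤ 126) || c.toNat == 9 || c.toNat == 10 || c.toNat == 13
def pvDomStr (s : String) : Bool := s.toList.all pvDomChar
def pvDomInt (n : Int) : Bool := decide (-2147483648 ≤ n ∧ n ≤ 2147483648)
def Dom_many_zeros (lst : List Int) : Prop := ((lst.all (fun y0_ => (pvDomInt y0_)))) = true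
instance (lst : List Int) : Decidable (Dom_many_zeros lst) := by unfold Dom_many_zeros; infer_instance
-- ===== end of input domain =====

-- B replaces the running zero-counter with a nonzero-position index table plus a consecutive-difference pass (alternative decomposition, same cost).

-- ===== PORT A =====
def many_zeros (lst : List Int) : List Int :=
  (lst.foldl (fun (s : Int × List Int) x =>
      if x = 0 then (s.1 + 1, s.2) else (0, s.2 ++ [s.1])) (0, [])).2

-- ===== PORT B =====
-- B-side helpers: enumeration with start index, and the consecutive-difference pass
def pvEnumFrom (i : Nat) : List Int → List (Nat × Int)
  | [] => []
  | x :: xs => (i, x) :: pvEnumFrom (i + 1) xs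

def pvGaps (prev : Int) : List Nat → List Int
  | [] => []
  | p :: ps => ((p : Int) - prev - 1) :: pvGaps (p : Int) ps

def many_zeros_alt (lst : List Int) : List Int :=
  pvGaps (-1) (((pvEnumFrom 0 lst).filter (fun px => px.2 ≠ 0)).map (fun px => px.1))

-- ===== PRECONDITION & SPEC =====
def Spec_many_zeros (lst : List Int) (out : List Int) : Prop := out = many_zeros_alt lst
instance (lst : List Int) (out : List Int) : Decidable (Spec_many_zeros lst out) := by unfold Spec_many_zeros; infer_instance

-- ===== CLAIM (what is proved, stated in full; the proofs are below) =====
def Claim_equal_many_zeros : Prop := ∀ (lst : List Int), Dom_many_zeros lst → Spec_many_zeros lst (many_zeros lst)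

-- ===== LEMMAS AND PROOFS =====

-- ===== VERDICT (by name: the statement is the Claim_ definition above) =====
-- A's loop without the accumulator
def pvLoopA (count : Int) : List Int → List Int
  | [] => []
  | x :: xs => if x = 0 then pvLoopA (count + 1) xs else count :: pvLoopA 0 xs

theorem pvFoldA_eq (lst : List Int) (count : Int) (acc : List Int) :
    (lst.foldl (fun (s : Int × List Int) x =>
      if x = 0 then (s.1 + 1, s.2) else (0, s.2 ++ [s.1])) (count, acc)).2
    = acc ++ pvLoopA count lst := by
  induction lst generalizing count acc with
  | nil => simp [pvLoopA]
  | cons x xs ih =>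
    simp only [List.foldl, pvLoopA]
    by_cases hx : x = 0 <;> simp [hx, ih]

theorem pvLoopA_eq_gaps (lst : List Int) (i : Nat) (count prev : Int)
    (h : count = (i : Int) - prev - 1) :
    pvLoopA count lst
    = pvGaps prev (((pvEnumFrom i lst).filter (fun px => px.2 ≠ 0)).map (fun px => px.1)) := by
  induction lst generalizing i count prev with
  | nil => simp [pvLoopA, pvEnumFrom, pvGaps]
  | cons x xs ih =>
    by_cases hx : x = 0
    · simp only [pvLoopA, pvEnumFrom, hx, if_pos]
      have hfilter : (((i, (0:Int)) :: pvEnumFrom (i+1) xs).filter (fun px => px.2 ≠ 0))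
          = (pvEnumFrom (i+1) xs).filter (fun px => px.2 ≠ 0) := by
        simp [List.filter]
      rw [hfilter]
      exact ih (i+1) _ prev (by push_cast; omega)
    · simp only [pvLoopA, pvEnumFrom, if_neg hx]
      have hfilter : (((i, x) :: pvEnumFrom (i+1) xs).filter (fun px => px.2 ≠ 0))
          = (i, x) :: (pvEnumFrom (i+1) xs).filter (fun px => px.2 ≠ 0) := by
        simp [List.filter, hx]
      rw [hfilter]
      simp only [List.map, pvGaps]
      rw [h]
      exact congrArg _ (ih (i+1) 0 (i : Int) (by push_cast; omega))

theorem many_zeros_spec : Claim_equal_many_zeros := by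
  intro lst _
  unfold Spec_many_zeros many_zeros many_zeros_alt
  rw [pvFoldA_eq, List.nil_append]
  exact pvLoopA_eq_gaps lst 0 0 (-1) (by norm_num)
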